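-- pv_equiv track=rewrite | github.com/novayo/LeetCode | 1423_Maximum_Points_You_Can_Obtain_from_Cards/try_1.py | maxScore
-- ===== SOURCE A (Python) =====
-- from typing import List
--
-- def maxScore(cardPoints: List[int], k: int) -> int:
--     '''
--     two pointer
--     if k < len // 2: find minimum subarray
--     else: two pointer
--     '''
--
--     if k < len(cardPoints) // 2:
--         i, j = 0, k-1
--         ans = cur_sum = sum(cardPoints[:j+1])
--         while i > -k:
--             i, j = i-1, j-1
--             cur_sum += (cardPoints[i] - cardPoints[j+1])
--             ans = max(ans, cur_sum)
--     else:
--         i, j = 0, len(cardPoints)-k-1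
--         ans = cur_sum = sum(cardPoints[:j+1])
--         while j < len(cardPoints)-1:
--             i, j = i+1, j+1
--             cur_sum += (cardPoints[j] - cardPoints[i-1])
--             ans = min(ans, cur_sum)
--         ans = sum(cardPoints) - ans
--     return ans
-- ===== SOURCE B (Python) =====
-- from typing import List
--
-- def maxScore(cardPoints: List[int], k: int) -> int:
--     # one uniform sliding window over all k+1 left/right splits, no case split
--     cur = sum(cardPoints[:k])
--     ans = cur
--     for i in range(1, k + 1):
--         cur += cardPoints[-i] - cardPoints[k - i]
--         ans = max(ans, cur)
--     return ans
-- ===== Notes on version B (the rewrite author's own statement) =====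
-- stated objective: simpler
-- what changed: Replaces A's two-branch strategy (maximize a window directly when k is small, otherwise minimize the complementary middle window and subtract from the total) by a single uniform sliding-window pass that maximizes over all k+1 ways to split the k picks between the two ends.
import Mathlib
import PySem

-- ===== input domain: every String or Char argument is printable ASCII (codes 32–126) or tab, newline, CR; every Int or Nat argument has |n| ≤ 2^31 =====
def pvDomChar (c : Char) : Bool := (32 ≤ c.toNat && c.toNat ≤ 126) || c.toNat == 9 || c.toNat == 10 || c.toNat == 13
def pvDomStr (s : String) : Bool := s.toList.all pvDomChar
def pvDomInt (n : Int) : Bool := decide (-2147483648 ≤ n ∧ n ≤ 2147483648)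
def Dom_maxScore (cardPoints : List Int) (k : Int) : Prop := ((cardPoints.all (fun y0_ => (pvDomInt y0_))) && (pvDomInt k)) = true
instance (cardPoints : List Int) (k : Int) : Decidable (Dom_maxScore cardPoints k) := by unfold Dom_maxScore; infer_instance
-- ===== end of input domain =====

-- B replaces A's two-branch min/max strategy by one uniform sliding-window pass (objective: simpler).

-- ===== PORT A =====
-- while i > -k: i,j = i-1,j-1; cur += cp[i]-cp[j+1]; ans = max(ans,cur)
def loopA1 (cp : List Int) (k : Int) (i j cur ans : Int) : Int :=
  if i > -k then
    let i' := i - 1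
    let j' := j - 1
    let cur' := cur + ((PySem.List.pyGet? cp i').getD 0 - (PySem.List.pyGet? cp (j' + 1)).getD 0)
    loopA1 cp k i' j' cur' (max ans cur')
  else ans
termination_by (i + k).toNat
decreasing_by omega

-- while j < len-1: i,j = i+1,j+1; cur += cp[j]-cp[i-1]; ans = min(ans,cur)
def loopA2 (cp : List Int) (i j cur ans : Int) : Int :=
  if j < (cp.length : Int) - 1 then
    let i' := i + 1
    let j' := j + 1
    let cur' := cur + ((PySem.List.pyGet? cp j').getD 0 - (PySem.List.pyGet? cp (i' - 1)).getD 0)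
    loopA2 cp i' j' cur' (min ans cur')
  else ans
termination_by ((cp.length : Int) - 1 - j).toNat
decreasing_by omega

def maxScore (cardPoints : List Int) (k : Int) : Int :=
  if k < PySem.Int.floordiv (cardPoints.length : Int) 2 then
    let j := k - 1
    let cur := (PySem.List.slice cardPoints none (some (j + 1))).sum
    loopA1 cardPoints k 0 j cur cur
  else
    let j := (cardPoints.length : Int) - k - 1
    let cur := (PySem.List.slice cardPoints none (some (j + 1))).sum
    let ans := loopA2 cardPoints 0 j cur cur
    cardPoints.sum - ans

-- ===== PORT B =====
-- cur = sum(cp[:k]); for i in range(1,k+1): cur += cp[-i]-cp[k-i]; ans = max(ans,cur)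
def maxScore_alt (cardPoints : List Int) (k : Int) : Int :=
  let cur := (PySem.List.slice cardPoints none (some k)).sum
  ((PySem.List.pyRange 1 (k + 1) 1).foldl
    (fun (p : Int × Int) i =>
      let cur' := p.1 + ((PySem.List.pyGet? cardPoints (-i)).getD 0 - (PySem.List.pyGet? cardPoints (k - i)).getD 0)
      (cur', max p.2 cur'))
    (cur, cur)).2

-- ===== PRECONDITION & SPEC =====
-- Pre_ excludes exactly k > len(cardPoints), where the Python A (and B) raises IndexError.
def Pre_maxScore (cardPoints : List Int) (k : Int) : Prop := k ≤ (cardPoints.length : Int)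
instance (cardPoints : List Int) (k : Int) : Decidable (Pre_maxScore cardPoints k) := by unfold Pre_maxScore; infer_instance
def pvWitness_maxScore : List Int × Int := ([1, 2, 3, 4, 5], 3)

def Spec_maxScore (cardPoints : List Int) (k : Int) (out : Int) : Prop := out = maxScore_alt cardPoints k
instance (cardPoints : List Int) (k : Int) (out : Int) : Decidable (Spec_maxScore cardPoints k out) := by unfold Spec_maxScore; infer_instance

-- ===== CLAIM =====
def Claim_equal_maxScore : Prop := ∀ (cardPoints : List Int) (k : Int), Dom_maxScore cardPoints k → Pre_maxScore cardPoints k → Spec_maxScore cardPoints k (maxScore cardPoints k)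

-- ===== LEMMAS AND PROOFS =====

-- window sum: sum of cp[s .. s+w-1]
def wsum (cp : List Int) (w s : Nat) : Int := ((cp.drop s).take w).sum

-- running min/max of ans with g (t+1), …, g (t+m), mirroring the loops
def runMin (g : Nat → Int) (t : Nat) (a : Int) : Nat → Int
  | 0 => a
  | m + 1 => runMin g (t + 1) (min a (g (t + 1))) m

def runMax (g : Nat → Int) (t : Nat) (a : Int) : Nat → Int
  | 0 => a
  | m + 1 => runMax g (t + 1) (max a (g (t + 1))) m

theorem pyRange_one_nil (a b : Int) (h : b ≤ a) : PySem.List.pyRange a b 1 = [] := by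
  rw [List.eq_nil_iff_forall_not_mem]
  intro x hx
  rw [PySem.List.mem_pyRange_one] at hx
  omega

theorem wsum_succ (cp : List Int) (w s : Nat) (h : s + w < cp.length) :
    wsum cp w (s + 1) = wsum cp w s + cp.getD (s + w) 0 - cp.getD s 0 := by
  have hs : s < cp.length := by omega
  have hd : cp.drop s = cp[s] :: cp.drop (s + 1) := List.drop_eq_getElem_cons hs
  have h1 : cp.getD s 0 = cp[s] := List.getD_eq_getElem cp 0 hs
  have h2 : cp.getD (s + w) 0 = cp[s + w] := List.getD_eq_getElem cp 0 h
  unfold wsum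
  cases w with
  | zero => simp
  | succ v =>
    have hl : v < (cp.drop (s + 1)).length := by simp; omega
    have ht : (cp.drop (s + 1)).take (v + 1) = (cp.drop (s + 1)).take v ++ [(cp.drop (s + 1))[v]] := by
      rw [List.take_add_one]; simp [List.getElem?_eq_getElem hl]
    have hg : (cp.drop (s + 1))[v] = cp[s + (v + 1)] := by
      rw [List.getElem_drop]; congr 1; omega
    have hd' : (cp.drop s).take (v + 1) = cp[s] :: (cp.drop (s + 1)).take v := by
      rw [hd, List.take_succ_cons]
    rw [ht, hg, hd', h1, h2]
    simp
    omega

theorem loopA1_eq_fold (cp : List Int) (k : Int) :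
    ∀ (m t : Nat) (cur ans : Int), (t : Int) + m = k →
    loopA1 cp k (-(t : Int)) (k - 1 - t) cur ans
      = ((PySem.List.pyRange ((t : Int) + 1) (k + 1) 1).foldl
          (fun (p : Int × Int) i =>
            (p.1 + ((PySem.List.pyGet? cp (-i)).getD 0 - (PySem.List.pyGet? cp (k - i)).getD 0),
             max p.2 (p.1 + ((PySem.List.pyGet? cp (-i)).getD 0 - (PySem.List.pyGet? cp (k - i)).getD 0))))
          (cur, ans)).2 := by
  intro m
  induction m with
  | zero =>
    intro t cur ans hm
    rw [loopA1, pyRange_one_nil _ _ (by omega), if_neg (by omega)]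
    rfl
  | succ m ih =>
    intro t cur ans hm
    rw [loopA1, if_pos (by omega)]
    rw [PySem.List.pyRange_one_cons (by omega)]
    simp only [List.foldl_cons]
    have e1 : -(t : Int) - 1 = -((t : Int) + 1) := by ring
    have e2 : (k - 1 - (t : Int) - 1) + 1 = k - ((t : Int) + 1) := by ring
    rw [e1, e2]
    have := ih (t + 1) (cur + ((PySem.List.pyGet? cp (-((t : Int) + 1))).getD 0 - (PySem.List.pyGet? cp (k - ((t : Int) + 1))).getD 0)) (max ans (cur + ((PySem.List.pyGet? cp (-((t : Int) + 1))).getD 0 - (PySem.List.pyGet? cp (k - ((t : Int) + 1))).getD 0))) (by push_cast; omega)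
    push_cast at this
    have e4 : k - 1 - (t : Int) - 1 = k - 1 - ((t : Int) + 1) := by ring
    rw [e4]
    exact this

theorem loopA2_eq_runMin (cp : List Int) (w : Nat) :
    ∀ (m s : Nat) (ans : Int), s + w + m = cp.length →
    loopA2 cp (s : Int) ((s : Int) + w - 1) (wsum cp w s) ans
      = runMin (fun t => wsum cp w t) s ans m := by
  intro m
  induction m with
  | zero =>
    intro s ans hm
    rw [loopA2, if_neg (by omega)]
    rfl
  | succ m ih =>
    intro s ans hm
    rw [loopA2, if_pos (by omega)]
    simp only []
    have hi : ((s : Int) + w - 1 + 1) = ((s + w : Nat) : Int) := by push_cast; ring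
    have hi2 : ((s : Int) + 1 - 1) = ((s : Nat) : Int) := by ring
    rw [hi, hi2, PySem.List.pyGet?_natCast, PySem.List.pyGet?_natCast]
    have hcur : wsum cp w s + (cp[s + w]?.getD 0 - cp[s]?.getD 0) = wsum cp w (s + 1) := by
      rw [wsum_succ cp w s (by omega)]
      simp [List.getD]
      omega
    rw [hcur]
    have hgoal := ih (s + 1) (min ans (wsum cp w (s + 1))) (by omega)
    have e1 : ((s : Int) + 1) = (((s + 1 : Nat)) : Int) := by push_cast; ring
    have e2 : (((s + w : Nat)) : Int) = (((s + 1 : Nat)) : Int) + w - 1 := by push_cast; ring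
    rw [e1, e2, hgoal]
    rfl

theorem foldB_eq_runMax (cp : List Int) (k : Int) (g : Nat → Int)
    (hstep : ∀ u : Nat, (u : Int) < k →
      g (u + 1) = g u + ((PySem.List.pyGet? cp (-((u : Int) + 1))).getD 0
        - (PySem.List.pyGet? cp (k - ((u : Int) + 1))).getD 0)) :
    ∀ (m t : Nat) (ans : Int), (t : Int) + m = k →
    ((PySem.List.pyRange ((t : Int) + 1) (k + 1) 1).foldl
        (fun (p : Int × Int) i =>
          (p.1 + ((PySem.List.pyGet? cp (-i)).getD 0 - (PySem.List.pyGet? cp (k - i)).getD 0),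
           max p.2 (p.1 + ((PySem.List.pyGet? cp (-i)).getD 0 - (PySem.List.pyGet? cp (k - i)).getD 0))))
        (g t, ans)).2 = runMax g t ans m := by
  intro m
  induction m with
  | zero =>
    intro t ans hm
    rw [pyRange_one_nil _ _ (by omega)]
    rfl
  | succ m ih =>
    intro t ans hm
    rw [PySem.List.pyRange_one_cons (by omega)]
    simp only [List.foldl_cons]
    have hc : g t + ((PySem.List.pyGet? cp (-((t : Int) + 1))).getD 0 - (PySem.List.pyGet? cp (k - ((t : Int) + 1))).getD 0) = g (t + 1) := (hstep t (by omega)).symm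
    rw [hc]
    have := ih (t + 1) (max ans (g (t + 1))) (by push_cast; omega)
    push_cast at this
    rw [this]
    rfl

theorem runMax_dual (T : Int) (h : Nat → Int) :
    ∀ (m t : Nat) (a : Int), runMax (fun u => T - h u) t (T - a) m = T - runMin h t a m := by
  intro m
  induction m with
  | zero => intro t a; rfl
  | succ m ih =>
    intro t a
    show runMax (fun u => T - h u) (t + 1) (max (T - a) (T - h (t + 1))) m = _
    have : max (T - a) (T - h (t + 1)) = T - min a (h (t + 1)) := by omega
    rw [this, ih]
    rfl

theorem runMin_shift (g : Nat → Int) :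
    ∀ (m t : Nat) (a : Int), runMin g (t + 1) a m = runMin (fun u => g (u + 1)) t a m := by
  intro m
  induction m with
  | zero => intro t a; rfl
  | succ m ih => intro t a; show runMin g (t + 2) _ m = _; rw [ih]; rfl

theorem runMin_peel_last (g : Nat → Int) :
    ∀ (m t : Nat) (a : Int), runMin g t a (m + 1) = min (runMin g t a m) (g (t + m + 1)) := by
  intro m
  induction m with
  | zero => intro t a; rfl
  | succ m ih =>
    intro t a
    show runMin g (t + 1) (min a (g (t + 1))) (m + 1) = _
    rw [ih]
    show _ = min (runMin g (t + 1) (min a (g (t + 1))) m) (g (t + (m + 1) + 1))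
    congr 2
    omega

theorem runMin_min_init (g : Nat → Int) :
    ∀ (m t : Nat) (c a : Int), runMin g t (min c a) m = min c (runMin g t a m) := by
  intro m
  induction m with
  | zero => intro t c a; rfl
  | succ m ih =>
    intro t c a
    show runMin g (t + 1) (min (min c a) (g (t + 1))) m = _
    rw [min_assoc, ih]
    rfl

theorem runMin_rev (h : Nat → Int) :
    ∀ K : Nat, runMin (fun t => h (K - t)) 0 (h K) K = runMin h 0 (h 0) K := by
  intro K
  induction K with
  | zero => rfl
  | succ K ih =>
    show runMin (fun t => h (K + 1 - t)) 1 (min (h (K + 1)) (h (K + 1 - 1))) K = _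
    rw [runMin_shift]
    have he : (fun u => h (K + 1 - (u + 1))) = (fun t => h (K - t)) := by
      funext u; congr 1; omega
    rw [he]
    have h1 : (K + 1 - 1) = K := by omega
    rw [h1, runMin_min_init, ih, runMin_peel_last]
    simp [min_comm]

-- ===== VERDICT =====
theorem maxScore_spec : Claim_equal_maxScore := by
  intro cp k _ hpre
  unfold Pre_maxScore at hpre
  unfold Spec_maxScore maxScore maxScore_alt
  simp only []
  by_cases hk : k < PySem.Int.floordiv (cp.length : Int) 2
  · rw [if_pos hk]
    by_cases hk0 : 0 ≤ k
    · have hm : ((0 : Nat) : Int) + (k.toNat : Int) = k := by omega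
      have := loopA1_eq_fold cp k k.toNat 0
        ((PySem.List.slice cp none (some k)).sum)
        ((PySem.List.slice cp none (some k)).sum) hm
      have e0 : -((0 : Nat) : Int) = 0 := by norm_num
      have e1 : k - 1 - ((0 : Nat) : Int) = k - 1 := by norm_num
      have e2 : ((0 : Nat) : Int) + 1 = 1 := by norm_num
      rw [e0, e1, e2] at this
      have ek : k - 1 + 1 = k := by ring
      rw [ek]
      exact this
    · rw [loopA1, if_neg (by omega), pyRange_one_nil _ _ (by omega)]
      have ek : k - 1 + 1 = k := by ring
      rw [ek]
      rfl
  · rw [if_neg hk]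
    have hnn : 0 ≤ k := by
      have h2 : PySem.Int.floordiv (cp.length : Int) 2 = ((cp.length / 2 : Nat) : Int) :=
        PySem.Int.floordiv_natCast cp.length 2
      omega
    set K := k.toNat with hK
    have hkK : k = (K : Int) := by omega
    have hKn : K ≤ cp.length := by omega
    set w := cp.length - K with hw
    -- A side
    have hj1 : (cp.length : Int) - k - 1 + 1 = ((w : Nat) : Int) := by
      rw [hkK]; push_cast [hw]; omega
    have hsliceA : PySem.List.slice cp none (some ((w : Nat) : Int)) = cp.take w :=
      PySem.List.slice_to_natCast cp w
    have hW0 : (cp.take w).sum = wsum cp w 0 := by simp [wsum]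
    have hA := loopA2_eq_runMin cp w K 0 (wsum cp w 0) (by omega)
    have ej : ((0 : Nat) : Int) + (w : Int) - 1 = (cp.length : Int) - k - 1 := by
      rw [hkK]; push_cast [hw]; omega
    have ez : ((0 : Nat) : Int) = (0 : Int) := by norm_num
    rw [ej, ez] at hA
    rw [hj1, hsliceA, hW0, hA]
    -- B side
    have hsliceB : PySem.List.slice cp none (some k) = cp.take K := by
      rw [PySem.List.slice_to cp hnn]
    have hg0 : (cp.take K).sum = cp.sum - wsum cp w K := by
      have hlen : (cp.drop K).length = w := by simp [hw]
      have htk : (cp.drop K).take w = cp.drop K := by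
        rw [← hlen]; exact List.take_length
      have : wsum cp w K = (cp.drop K).sum := by rw [wsum, htk]
      rw [this]
      have := List.sum_take_add_sum_drop cp K
      omega
    have hstep : ∀ u : Nat, (u : Int) < k →
        (fun t => cp.sum - wsum cp w (K - t)) (u + 1)
          = (fun t => cp.sum - wsum cp w (K - t)) u
            + ((PySem.List.pyGet? cp (-((u : Int) + 1))).getD 0
              - (PySem.List.pyGet? cp (k - ((u : Int) + 1))).getD 0) := by
      intro u hu
      simp only []
      have huK : u < K := by omega
      have hws := wsum_succ cp w (K - u - 1) (by omega)
      have ha1 : K - u - 1 + 1 = K - u := by omega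
      have ha2 : K - u - 1 + w = cp.length - u - 1 := by omega
      rw [ha1, ha2] at hws
      have hga : PySem.List.pyGet? cp (-((u : Int) + 1)) = cp[cp.length - (u + 1)]? := by
        have : (-((u : Int) + 1)) = (-(((u + 1 : Nat)) : Int)) := by push_cast; ring
        rw [this]
        exact PySem.List.pyGet?_neg_natCast cp (u + 1) (by omega) (by omega)
      have hidx : cp.length - (u + 1) = cp.length - u - 1 := by omega
      rw [hidx] at hga
      have hgb : PySem.List.pyGet? cp (k - ((u : Int) + 1)) = cp[K - u - 1]? := by
        have : k - ((u : Int) + 1) = (((K - u - 1 : Nat)) : Int) := by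
          rw [hkK]; omega
        rw [this, PySem.List.pyGet?_natCast]
      rw [hga, hgb]
      have hb1 : cp[cp.length - u - 1]?.getD 0 = cp.getD (cp.length - u - 1) 0 := by
        simp [List.getD]
      have hb2 : cp[K - u - 1]?.getD 0 = cp.getD (K - u - 1) 0 := by
        simp [List.getD]
      rw [hb1, hb2]
      have e5 : K - (u + 1) = K - u - 1 := by omega
      rw [e5]
      omega
    have hB := foldB_eq_runMax cp k (fun t => cp.sum - wsum cp w (K - t)) hstep K 0
      (cp.sum - wsum cp w (K - 0)) (by omega)
    have eb : ((0 : Nat) : Int) + 1 = 1 := by norm_num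
    rw [eb] at hB
    have hg00 : (fun t => cp.sum - wsum cp w (K - t)) 0 = cp.sum - wsum cp w K := by
      simp only [Nat.sub_zero]
    rw [hg00] at hB
    have hKz : K - 0 = K := by omega
    rw [hKz] at hB
    rw [hsliceB, hg0, hB]
    -- combine: runMax dual + reversal
    have hdual := runMax_dual cp.sum (fun t => wsum cp w (K - t)) K 0 (wsum cp w K)
    rw [hdual]
    have hrev := runMin_rev (fun t => wsum cp w t) K
    have hrev' : runMin (fun t => wsum cp w (K - t)) 0 (wsum cp w K) K
        = runMin (fun t => wsum cp w t) 0 (wsum cp w 0) K := hrev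
    rw [hrev']
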